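-- pv_equiv track=rewrite | github.com/gtfierro/shepherding-metadata | resolver.py | trim_prefix_tokenized
-- ===== SOURCE A (Python) =====
-- def trim_prefix_tokenized(names):
--     if len(names) <= 1:
--         return names
--     max_length = max(map(len, names))
--     pfx_size = 1
--     # increase pfx_size until it doesn't match, then reduce by 1 and trim
--     while pfx_size <= max_length:
--         pfx = names[0][:pfx_size]
--         if not all(map(lambda x: x[:pfx_size] == pfx, names[1:])):
--             pfx_size -= 1
--             return list([x[pfx_size:] for x in names])
--         pfx_size += 1
-- ===== SOURCE B (Python) =====
-- def trim_prefix_tokenized(names):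
--     if len(names) <= 1:
--         return names
--     first = names[0]
--     L = min(map(len, names))
--     k = 0
--     while k < L and all(n[k] == first[k] for n in names):
--         k += 1
--     return [n[k:] for n in names]
-- ===== Notes on version B (the rewrite author's own statement) =====
-- stated objective: alternative
-- what changed: Replaces A's loop that re-compares ever-growing prefix slices with a single character-wise LCP scan up to the minimum length followed by one trim; avoids repeated slice comparisons but is not measurably faster on the benchmark inputs.
-- outside the precondition, e.g. on trim_prefix_tokenized(['a', 'a']): A returns None, B returns ['', '']
import Mathlib
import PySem

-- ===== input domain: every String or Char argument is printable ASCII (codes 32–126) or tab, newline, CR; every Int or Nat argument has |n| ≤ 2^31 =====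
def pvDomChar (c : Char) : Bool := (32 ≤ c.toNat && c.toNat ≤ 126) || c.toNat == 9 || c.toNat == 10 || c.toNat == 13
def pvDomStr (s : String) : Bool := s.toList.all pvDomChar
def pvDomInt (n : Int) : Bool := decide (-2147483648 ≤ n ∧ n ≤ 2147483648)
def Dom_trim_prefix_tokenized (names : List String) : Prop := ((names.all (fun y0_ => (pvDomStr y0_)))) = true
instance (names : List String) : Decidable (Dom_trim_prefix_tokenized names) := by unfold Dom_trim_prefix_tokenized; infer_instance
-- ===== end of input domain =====

-- B replaces A's repeated prefix-slice comparisons with one character-wise LCP scan then a single trim.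

-- ===== PORT A =====
-- A's while-loop: pfx_size counts up from 1 while every name still matches names[0][:pfx_size];
-- on the first mismatch it trims pfx_size-1 characters; if the loop runs out it falls off (Python returns None → none).
def aTrimLoop (ts : List (List Char)) (first : List Char) (maxLen : Nat) (pfxSize : Nat) :
    Option (List (List Char)) :=
  if _h : pfxSize ≤ maxLen then
    let pfx := first.take pfxSize
    if ts.tail.all (fun x => x.take pfxSize == pfx) then
      aTrimLoop ts first maxLen (pfxSize + 1)
    else
      some (ts.map (fun x => x.drop (pfxSize - 1)))
  else none
termination_by maxLen + 1 - pfxSize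

def trim_prefix_tokenized (names : List String) : Option (List String) :=
  if names.length ≤ 1 then some names
  else
    let ts := names.map String.toList
    -- max(map(len, names)); foldl max 0 is Python's max here since ts is nonempty and lengths are ≥ 0
    let maxLen := (ts.map List.length).foldl max 0
    (aTrimLoop ts (ts.headD []) maxLen 1).map (fun l => l.map String.mk)

-- ===== PORT B =====
-- B's while-loop: scan the common prefix character by character, up to the minimum length.
def bScan (ts : List (List Char)) (first : List Char) (minLen : Nat) (k : Nat) : Nat :=
  if _h : k < minLen ∧ ts.all (fun n => n[k]? == first[k]?) then
    bScan ts first minLen (k + 1)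
  else k
termination_by minLen - k

def trim_prefix_tokenized_alt (names : List String) : Option (List String) :=
  if names.length ≤ 1 then some names
  else
    let ts := names.map String.toList
    let first := ts.headD []
    -- min(map(len, names)); foldl min first.length is Python's min since first's length is in the list
    let minLen := (ts.map List.length).foldl min first.length
    let k := bScan ts first minLen 0
    some (ts.map (fun n => String.mk (n.drop k)))

-- ===== PRECONDITION & SPEC =====
-- Pre_ excludes lists of length ≥ 2 whose elements are all equal: there A's loop runs past
-- the maximal length and falls off, returning None instead of a list; B returns the trimmed
-- (all-empty) list there.
def Pre_trim_prefix_tokenized (names : List String) : Prop :=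
  names.length ≤ 1 ∨ ∃ x ∈ names, x ≠ names.headD ""

instance (names : List String) : Decidable (Pre_trim_prefix_tokenized names) := by
  unfold Pre_trim_prefix_tokenized; infer_instance

def pvWitness_trim_prefix_tokenized : List String := ["net1", "net2"]

def Spec_trim_prefix_tokenized (names : List String) (out : Option (List String)) : Prop :=
  out = trim_prefix_tokenized_alt names
instance (names : List String) (out : Option (List String)) : Decidable (Spec_trim_prefix_tokenized names out) := by
  unfold Spec_trim_prefix_tokenized; infer_instance

-- ===== CLAIM (what is proved, stated in full; the proofs are below) =====
def Claim_equal_trim_prefix_tokenized : Prop :=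
  ∀ (names : List String), Dom_trim_prefix_tokenized names →
    Pre_trim_prefix_tokenized names →
    Spec_trim_prefix_tokenized names (trim_prefix_tokenized names)

-- ===== LEMMAS AND PROOFS =====

-- foldl max / min facts
lemma init_le_foldl_max (l : List Nat) (a : Nat) : a ≤ l.foldl max a := by
  induction l generalizing a with
  | nil => simp
  | cons h t ih => exact le_trans (le_max_left a h) (ih (max a h))

lemma le_foldl_max (l : List Nat) (a : Nat) : ∀ x ∈ l, x ≤ l.foldl max a := by
  induction l generalizing a with
  | nil => simp
  | cons h t ih =>
    intro x hx
    rcases List.mem_cons.1 hx with rfl | hx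
    · exact le_trans (le_max_right a x) (init_le_foldl_max t (max a x))
    · exact ih (max a h) x hx

lemma foldl_min_cases (l : List Nat) (a : Nat) : l.foldl min a = a ∨ l.foldl min a ∈ l := by
  induction l generalizing a with
  | nil => simp
  | cons h t ih =>
    rcases ih (min a h) with hc | hc
    · rcases Nat.le_total a h with hle | hle
      · left; simpa [List.foldl, Nat.min_eq_left hle] using hc
      · right; simp only [List.foldl] at *
        rw [hc, Nat.min_eq_right hle]; exact List.mem_cons_self
    · right; exact List.mem_cons_of_mem _ hc

-- option-toList injectivity (used to recover x[k]? = first[k]? from take equalities)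
lemma option_toList_inj {α : Type} {o₁ o₂ : Option α} (h : o₁.toList = o₂.toList) : o₁ = o₂ := by
  cases o₁ <;> cases o₂ <;> simp_all

-- key1: matching at k plus equal k-th entries gives matching at k+1 (List.take_succ)
lemma match_step (first x : List Char) (k : Nat)
    (h : x.take k = first.take k) (hc : x[k]? = first[k]?) :
    x.take (k + 1) = first.take (k + 1) := by
  rw [List.take_succ, List.take_succ, h, hc]

-- key2: under "not all equal", matching at k+1 forces k < minLen and equal k-th entries
lemma match_succ_inv (first : List Char) (rest : List (List Char)) (L k : Nat)
    (hLmem : ∃ s ∈ first :: rest, s.length = L)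
    (hne : ∃ x ∈ rest, x ≠ first)
    (h : ∀ x ∈ rest, x.take (k + 1) = first.take (k + 1)) :
    k < L ∧ ∀ x ∈ first :: rest, x[k]? = first[k]? := by
  have hk : ∀ x ∈ rest, x.take k = first.take k := by
    intro x hx
    have := h x hx
    calc x.take k = (x.take (k+1)).take k := by simp [List.take_take]
      _ = (first.take (k+1)).take k := by rw [this]
      _ = first.take k := by simp [List.take_take]
  have hchar : ∀ x ∈ first :: rest, x[k]? = first[k]? := by
    intro x hx
    rcases List.mem_cons.1 hx with rfl | hx
    · rfl
    · have h1 := h x hx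
      rw [List.take_succ, List.take_succ, hk x hx] at h1
      exact option_toList_inj (by simpa using h1)
  refine ⟨?_, hchar⟩
  by_contra hkL
  push_neg at hkL  -- L ≤ k
  -- then the shortest string is exhausted and matching at k+1 makes all strings equal first
  obtain ⟨s, hs, hsL⟩ := hLmem
  have hall : ∀ x ∈ first :: rest, x.take (k+1) = first.take (k+1) := by
    intro x hx
    rcases List.mem_cons.1 hx with rfl | hx
    · rfl
    · exact h x hx
  have hstake : s.take (k+1) = s := List.take_of_length_le (by omega)
  have hsfirst : s = first.take (k+1) := by rw [← hstake, hall s hs]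
  have hlenf : first.length ≤ k := by
    have := congrArg List.length hsfirst
    simp [List.length_take] at this
    omega
  have hftake : first.take (k+1) = first := List.take_of_length_le (by omega)
  have halleq : ∀ x ∈ first :: rest, x = first := by
    intro x hx
    have h1 := hall x hx
    rw [hftake] at h1
    have hlx : x.length ≤ k + 1 := by
      by_contra hgt
      push_neg at hgt
      have := congrArg List.length h1
      simp [List.length_take] at this
      omega
    rw [List.take_of_length_le hlx] at h1
    exact h1
  obtain ⟨x, hx, hxne⟩ := hne
  exact hxne (halleq x (List.mem_cons_of_mem _ hx))

-- under "not all equal", matching at k forces k < M (else every string equals first)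
lemma match_lt_max (first : List Char) (rest : List (List Char)) (M k : Nat)
    (hM : ∀ x ∈ first :: rest, x.length ≤ M)
    (hne : ∃ x ∈ rest, x ≠ first)
    (h : ∀ x ∈ rest, x.take k = first.take k) : k < M := by
  by_contra hkM
  push_neg at hkM  -- M ≤ k
  obtain ⟨x, hx, hxne⟩ := hne
  have h1 := h x hx
  rw [List.take_of_length_le (le_trans (hM x (List.mem_cons_of_mem _ hx)) hkM),
      List.take_of_length_le (le_trans (hM first List.mem_cons_self) hkM)] at h1
  exact hxne h1

-- the loop simulation: A's slice loop at pfx_size k+1 returns the trim at B's scan position from k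
lemma loop_sim (first : List Char) (rest : List (List Char)) (M L : Nat)
    (hM : ∀ x ∈ first :: rest, x.length ≤ M)
    (hLmem : ∃ s ∈ first :: rest, s.length = L)
    (hne : ∃ x ∈ rest, x ≠ first) :
    ∀ d k, M - k ≤ d → (∀ x ∈ rest, x.take k = first.take k) →
      aTrimLoop (first :: rest) first M (k + 1) =
        some ((first :: rest).map (fun x => x.drop (bScan (first :: rest) first L k))) := by
  intro d
  induction d with
  | zero =>
    intro k hd hmatch
    have := match_lt_max first rest M k hM hne hmatch
    omega
  | succ d ih =>
    intro k hd hmatch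
    have hkM : k < M := match_lt_max first rest M k hM hne hmatch
    rw [aTrimLoop]
    simp only [List.tail_cons]
    rw [dif_pos (by omega : k + 1 ≤ M)]
    by_cases hm : ∀ x ∈ rest, x.take (k + 1) = first.take (k + 1)
    · -- match at k+1: A recurses; B's scan steps
      have hcond : rest.all (fun x => x.take (k+1) == first.take (k+1)) = true := by
        simp only [List.all_eq_true, beq_iff_eq]; exact hm
      rw [if_pos hcond]
      obtain ⟨hkL, hchar⟩ := match_succ_inv first rest L k hLmem hne hm
      have hb : bScan (first :: rest) first L k = bScan (first :: rest) first L (k + 1) := by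
        rw [bScan]
        rw [dif_pos ⟨hkL, by simp only [List.all_eq_true, beq_iff_eq]; exact hchar⟩]
      rw [hb]
      exact ih (k + 1) (by omega) hm
    · -- mismatch at k+1: A trims k; B's scan stops at k
      have hcond : ¬ (rest.all (fun x => x.take (k+1) == first.take (k+1)) = true) := by
        simp only [List.all_eq_true, beq_iff_eq]; exact hm
      rw [if_neg hcond]
      have hb : bScan (first :: rest) first L k = k := by
        rw [bScan]
        rw [dif_neg]
        rintro ⟨hkL, hchar⟩
        simp only [List.all_eq_true, beq_iff_eq] at hchar
        exact hm (fun x hx => match_step first x k (hmatch x hx)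
          (hchar x (List.mem_cons_of_mem _ hx)))
      rw [hb]
      simp

-- ===== VERDICT (by name: the statement is the Claim_ definition above) =====
theorem trim_prefix_tokenized_spec : Claim_equal_trim_prefix_tokenized := by
  unfold Claim_equal_trim_prefix_tokenized Spec_trim_prefix_tokenized
  intro names _hdom hpre
  unfold trim_prefix_tokenized trim_prefix_tokenized_alt
  by_cases hlen : names.length ≤ 1
  · simp [hlen]
  · rw [if_neg hlen, if_neg hlen]
    obtain ⟨f, rest0, rfl⟩ : ∃ f rest0, names = f :: rest0 := by
      cases names with
      | nil => simp at hlen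
      | cons f r => exact ⟨f, r, rfl⟩
    rcases hpre with h1 | ⟨x, hx, hxne⟩
    · exact absurd h1 hlen
    · simp only [List.headD_cons] at hxne
      have hxrest : x ∈ rest0 := by
        rcases List.mem_cons.1 hx with rfl | hx'
        · exact absurd rfl hxne
        · exact hx'
      -- switch to lists of chars
      simp only [List.map_cons, List.headD_cons]
      have hne : ∃ y ∈ rest0.map String.toList, y ≠ f.toList :=
        ⟨x.toList, List.mem_map_of_mem hxrest,
          fun hc => hxne (String.toList_inj.1 hc)⟩
      have hMle : ∀ y ∈ f.toList :: rest0.map String.toList,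
          y.length ≤ (f.toList.length :: (rest0.map String.toList).map List.length).foldl max 0 := by
        intro y hy
        apply le_foldl_max
        rcases List.mem_cons.1 hy with rfl | hy
        · exact List.mem_cons_self
        · exact List.mem_cons_of_mem _ (List.mem_map_of_mem hy)
      have hLmem : ∃ s ∈ f.toList :: rest0.map String.toList,
          s.length = (f.toList.length :: (rest0.map String.toList).map List.length).foldl min f.toList.length := by
        rcases foldl_min_cases (f.toList.length :: (rest0.map String.toList).map List.length) f.toList.length with hc | hc
        · exact ⟨f.toList, List.mem_cons_self, hc.symm⟩
        · rcases List.mem_cons.1 hc with hc | hc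
          · exact ⟨f.toList, List.mem_cons_self, hc.symm⟩
          · obtain ⟨s, hs, hsl⟩ := List.mem_map.1 hc
            exact ⟨s, List.mem_cons_of_mem _ hs, hsl⟩
      have key := loop_sim f.toList (rest0.map String.toList) _ _ hMle hLmem hne
        ((f.toList.length :: (rest0.map String.toList).map List.length).foldl max 0) 0
        (by omega) (by intro y _; simp)
      simp only [Nat.zero_add] at key
      rw [key]
      simp
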